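-- pv_equiv track=rewrite | github.com/Muiz20/macula | scripts/preprocess.py | mine_confusion_pairs
-- ===== SOURCE A (Python) =====
-- def mine_confusion_pairs(ocr_aligned: str, gs_aligned: str) -> list[tuple[str, str]]:
--     """
--     Walk the aligned strings character by character.
--     When they differ, extract (ocr_pattern, gs_pattern) pairs.
--
--     The alignment uses '@' for gaps (insertions/deletions).
--     """
--     pairs = []
--     i = 0
--     n = min(len(ocr_aligned), len(gs_aligned))
--
--     while i < n:
--         if ocr_aligned[i] == gs_aligned[i]:
--             i += 1
--             continue
--
--         # Found a mismatch — extend to get the full error span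
--         j = i
--         while j < n and ocr_aligned[j] != gs_aligned[j]:
--             j += 1
--
--         ocr_span = ocr_aligned[i:j].replace('@', '')
--         gs_span = gs_aligned[i:j].replace('@', '')
--
--         # Only keep short, meaningful patterns (1-4 chars each)
--         if 0 < len(ocr_span) <= 4 and 0 < len(gs_span) <= 4:
--             # Lowercase both
--             pairs.append((ocr_span.lower(), gs_span.lower()))
--
--         i = j
--
--     return pairs
-- ===== SOURCE B (Python) =====
-- def mine_confusion_pairs(ocr_aligned: str, gs_aligned: str) -> list[tuple[str, str]]:
--     """One-pass fold over the zipped strings: accumulate the current mismatch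
--     run in two buffers and flush it on every matching character (and at the end)."""
--     pairs = []
--     ocr_run = []
--     gs_run = []
--
--     def flush():
--         if ocr_run:
--             ocr_span = ''.join(ocr_run).replace('@', '')
--             gs_span = ''.join(gs_run).replace('@', '')
--             if 0 < len(ocr_span) <= 4 and 0 < len(gs_span) <= 4:
--                 pairs.append((ocr_span.lower(), gs_span.lower()))
--             ocr_run.clear()
--             gs_run.clear()
--
--     for o, g in zip(ocr_aligned, gs_aligned):
--         if o == g:
--             flush()
--         else:
--             ocr_run.append(o)
--             gs_run.append(g)
--     flush()
--     return pairs
-- ===== Notes on version B (the rewrite author's own statement) =====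
-- stated objective: alternative
-- what changed: Replaces the nested index-based while loops with slicing by a single pass over zip(ocr, gs) that accumulates the current mismatch run in two buffers and flushes it at each matching character and at the end.
import Mathlib
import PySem

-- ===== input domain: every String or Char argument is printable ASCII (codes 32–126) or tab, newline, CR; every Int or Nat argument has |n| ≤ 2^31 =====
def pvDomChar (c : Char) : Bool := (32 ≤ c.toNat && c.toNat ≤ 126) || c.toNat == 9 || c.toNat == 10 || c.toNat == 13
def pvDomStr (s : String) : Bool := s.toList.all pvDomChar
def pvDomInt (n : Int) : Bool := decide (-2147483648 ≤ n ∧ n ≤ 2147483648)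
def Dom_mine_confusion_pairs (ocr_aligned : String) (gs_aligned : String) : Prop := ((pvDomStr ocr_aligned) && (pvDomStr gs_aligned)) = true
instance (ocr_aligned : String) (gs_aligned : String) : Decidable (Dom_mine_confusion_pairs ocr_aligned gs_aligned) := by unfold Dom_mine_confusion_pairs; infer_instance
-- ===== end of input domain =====

-- B replaces A's nested index/slice while-loops by a single pass over the zipped
-- characters that accumulates the current mismatch run in two buffers (objective: alternative).

-- ===== PORT A =====
-- inner 'while j < n and ocr_aligned[j] != gs_aligned[j]: j += 1'
def pvExtA (cs1 cs2 : List Char) (n : Nat) (j : Nat) : Nat :=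
  if _h : j < n ∧ PySem.List.pyGet? cs1 (j : Int) ≠ PySem.List.pyGet? cs2 (j : Int) then
    pvExtA cs1 cs2 n (j + 1)
  else j
termination_by n - j

theorem pvExtA_ge (cs1 cs2 : List Char) (n j : Nat) : j ≤ pvExtA cs1 cs2 n j := by
  fun_induction pvExtA <;> omega

-- outer 'while i < n' loop of A, carrying the pairs accumulator
def pvGoA (cs1 cs2 : List Char) (n : Nat) (i : Nat) (pairs : List (String × String)) :
    List (String × String) :=
  if hi : i < n then
    if heq : PySem.List.pyGet? cs1 (i : Int) = PySem.List.pyGet? cs2 (i : Int) then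
      pvGoA cs1 cs2 n (i + 1) pairs
    else
      let j := pvExtA cs1 cs2 n i
      let ocr_span := PySem.Chars.replace (PySem.List.slice cs1 (some (i : Int)) (some (j : Int))) ['@'] []
      let gs_span := PySem.Chars.replace (PySem.List.slice cs2 (some (i : Int)) (some (j : Int))) ['@'] []
      let pairs' :=
        if 0 < ocr_span.length ∧ ocr_span.length ≤ 4 ∧ 0 < gs_span.length ∧ gs_span.length ≤ 4 then
          pairs ++ [(String.ofList (PySem.Chars.lower ocr_span), String.ofList (PySem.Chars.lower gs_span))]
        else pairs
      pvGoA cs1 cs2 n j pairs'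
  else pairs
termination_by n - i
decreasing_by
  · omega
  · have h1 : pvExtA cs1 cs2 n i = pvExtA cs1 cs2 n (i + 1) := by
      rw [pvExtA, dif_pos ⟨hi, heq⟩]
    have h2 := pvExtA_ge cs1 cs2 n (i + 1)
    omega

def mine_confusion_pairs (ocr_aligned : String) (gs_aligned : String) : List (String × String) :=
  pvGoA ocr_aligned.toList gs_aligned.toList
    (min ocr_aligned.toList.length gs_aligned.toList.length) 0 []

-- ===== PORT B =====
-- 'flush()': emit the pending mismatch run (if any) and clear the buffers
def pvFlushB (pairs : List (String × String)) (orun grun : List Char) :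
    List (String × String) × List Char × List Char :=
  if orun ≠ [] then
    let ocr_span := PySem.Chars.replace orun ['@'] []
    let gs_span := PySem.Chars.replace grun ['@'] []
    if 0 < ocr_span.length ∧ ocr_span.length ≤ 4 ∧ 0 < gs_span.length ∧ gs_span.length ≤ 4 then
      (pairs ++ [(String.ofList (PySem.Chars.lower ocr_span), String.ofList (PySem.Chars.lower gs_span))], [], [])
    else (pairs, [], [])
  else (pairs, orun, grun)

-- loop body of B's single 'for o, g in zip(...)' pass
def pvStepB (st : List (String × String) × List Char × List Char) (p : Char × Char) :
    List (String × String) × List Char × List Char :=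
  if p.1 = p.2 then pvFlushB st.1 st.2.1 st.2.2
  else (st.1, st.2.1 ++ [p.1], st.2.2 ++ [p.2])

def mine_confusion_pairs_alt (ocr_aligned : String) (gs_aligned : String) : List (String × String) :=
  let st := (ocr_aligned.toList.zip gs_aligned.toList).foldl pvStepB ([], [], [])
  (pvFlushB st.1 st.2.1 st.2.2).1

-- ===== PRECONDITION & SPEC =====
def Spec_mine_confusion_pairs (ocr_aligned : String) (gs_aligned : String) (out : List (String × String)) : Prop := out = mine_confusion_pairs_alt ocr_aligned gs_aligned
instance (ocr_aligned : String) (gs_aligned : String) (out : List (String × String)) : Decidable (Spec_mine_confusion_pairs ocr_aligned gs_aligned out) := by unfold Spec_mine_confusion_pairs; infer_instance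

-- ===== CLAIM (what is proved, stated in full; the proofs are below) =====
def Claim_equal_mine_confusion_pairs : Prop := ∀ (ocr_aligned : String) (gs_aligned : String), Dom_mine_confusion_pairs ocr_aligned gs_aligned → Spec_mine_confusion_pairs ocr_aligned gs_aligned (mine_confusion_pairs ocr_aligned gs_aligned)

-- ===== LEMMAS AND PROOFS =====

-- predicate 'the paired characters differ'
def pvNe (p : Char × Char) : Bool := p.1 != p.2

-- the (0 or 1) pairs a mismatch run contributes
def pvEmit (orun grun : List Char) : List (String × String) :=
  let ocr_span := PySem.Chars.replace orun ['@'] []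
  let gs_span := PySem.Chars.replace grun ['@'] []
  if 0 < ocr_span.length ∧ ocr_span.length ≤ 4 ∧ 0 < gs_span.length ∧ gs_span.length ≤ 4 then
    [(String.ofList (PySem.Chars.lower ocr_span), String.ofList (PySem.Chars.lower gs_span))]
  else []

-- reference function: run-by-run reading of the zipped list
def pvF : List (Char × Char) → List (String × String)
  | [] => []
  | (a, b) :: t =>
    if a = b then pvF t
    else
      pvEmit (a :: (t.takeWhile pvNe).map Prod.fst) (b :: (t.takeWhile pvNe).map Prod.snd) ++
        pvF (t.dropWhile pvNe)
termination_by l => l.length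
decreasing_by
  all_goals (have := List.length_dropWhile_le pvNe t; simp; try omega)

-- B's pass with a pending run, in functional form
def pvH : List Char → List Char → List (Char × Char) → List (String × String)
  | ro, rg, [] => pvEmit ro rg
  | ro, rg, (a, b) :: t =>
    if a = b then pvEmit ro rg ++ pvH [] [] t
    else pvH (ro ++ [a]) (rg ++ [b]) t

theorem pvReplace_nil : PySem.Chars.replace ([] : List Char) ['@'] [] = [] := rfl

theorem pvEmit_nil (rg : List Char) : pvEmit [] rg = [] := by
  simp [pvEmit, pvReplace_nil]

theorem pvFlushB_fst (pairs : List (String × String)) (orun grun : List Char) :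
    (pvFlushB pairs orun grun).1 = pairs ++ pvEmit orun grun := by
  by_cases h : orun = []
  · subst h; simp [pvFlushB, pvEmit_nil]
  · simp only [pvFlushB, pvEmit, if_neg (by simpa using h), ne_eq, h, not_false_eq_true, if_pos]
    split <;> simp

theorem pvF_run (t : List (Char × Char)) :
    pvF t = pvEmit ((t.takeWhile pvNe).map Prod.fst) ((t.takeWhile pvNe).map Prod.snd) ++
      pvF (t.dropWhile pvNe) := by
  match t with
  | [] => simp [pvF, pvEmit_nil]
  | (a, b) :: t' =>
    by_cases h : a = b
    · subst h
      have hne : pvNe (a, a) = false := by simp [pvNe]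
      simp [pvF, List.takeWhile_cons, List.dropWhile_cons, hne, pvEmit_nil]
    · have hne : pvNe (a, b) = true := by simp [pvNe, h]
      simp [pvF, h, List.takeWhile_cons, List.dropWhile_cons, hne]

theorem pvH_eq_pvF (ps : List (Char × Char)) (ro rg : List Char) :
    pvH ro rg ps =
      pvEmit (ro ++ (ps.takeWhile pvNe).map Prod.fst) (rg ++ (ps.takeWhile pvNe).map Prod.snd) ++
        pvF (ps.dropWhile pvNe) := by
  induction ps generalizing ro rg with
  | nil => simp [pvH, pvF]
  | cons p t ih =>
    obtain ⟨a, b⟩ := p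
    by_cases h : a = b
    · subst h
      have hne : pvNe (a, a) = false := by simp [pvNe]
      rw [show pvH ro rg ((a, a) :: t) = pvEmit ro rg ++ pvH [] [] t from by simp [pvH],
        ih, List.nil_append, List.nil_append, ← pvF_run]
      simp [List.takeWhile_cons, List.dropWhile_cons, hne, pvF]
    · have hne : pvNe (a, b) = true := by simp [pvNe, h]
      simp only [pvH, if_neg h, List.takeWhile_cons, hne, if_true, List.dropWhile_cons,
        List.map_cons]
      rw [ih]
      simp

theorem pvFoldB (ps : List (Char × Char)) (acc : List (String × String)) (ro rg : List Char)
    (hlen : ro.length = rg.length) :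
    (pvFlushB (ps.foldl pvStepB (acc, ro, rg)).1 (ps.foldl pvStepB (acc, ro, rg)).2.1
        (ps.foldl pvStepB (acc, ro, rg)).2.2).1 = acc ++ pvH ro rg ps := by
  induction ps generalizing acc ro rg with
  | nil => simp [pvH, pvFlushB_fst]
  | cons p t ih =>
    obtain ⟨a, b⟩ := p
    by_cases h : a = b
    · subst h
      by_cases hro : ro = []
      · have hrg : rg = [] := by
          cases rg with
          | nil => rfl
          | cons x xs => subst hro; simp at hlen
        subst hro hrg
        have hstep : pvStepB (acc, ([] : List Char), ([] : List Char)) (a, a) = (acc, [], []) := by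
          simp [pvStepB, pvFlushB]
        rw [List.foldl_cons, hstep, ih _ _ _ rfl]
        simp [pvH, pvEmit_nil]
      · have hstep : pvStepB (acc, ro, rg) (a, a) = (acc ++ pvEmit ro rg, [], []) := by
          simp only [pvStepB, if_pos rfl, pvFlushB, pvEmit, ne_eq, hro, not_false_eq_true, if_pos]
          split <;> simp
        rw [List.foldl_cons, hstep, ih _ _ _ rfl]
        simp [pvH]
    · have hstep : pvStepB (acc, ro, rg) (a, b) = (acc, ro ++ [a], rg ++ [b]) := by
        simp [pvStepB, h]
      rw [List.foldl_cons, hstep, ih _ _ _ (by simp [hlen])]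
      simp [pvH, h]

theorem pvExtA_spec (cs1 cs2 : List Char) (n j : Nat) (hn : n = (cs1.zip cs2).length) :
    pvExtA cs1 cs2 n j = j + (((cs1.zip cs2).drop j).takeWhile pvNe).length := by
  fun_induction pvExtA with
  | case1 j h ih =>
    obtain ⟨hj, hne⟩ := h
    have hj1 : j < cs1.length := by simp [hn, List.length_zip] at hj; omega
    have hj2 : j < cs2.length := by simp [hn, List.length_zip] at hj; omega
    have hzj : j < (cs1.zip cs2).length := by omega
    have hdrop := List.drop_eq_getElem_cons hzj
    have hget : (cs1.zip cs2)[j] = (cs1[j], cs2[j]) := List.getElem_zip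
    have hcne : cs1[j] ≠ cs2[j] := by
      intro hc
      apply hne
      simp [PySem.List.pyGet?_natCast, List.getElem?_eq_getElem, hj1, hj2, hc]
    have hpv : pvNe ((cs1.zip cs2)[j]) = true := by simp [pvNe, hget, hcne]
    rw [ih, hdrop, List.takeWhile_cons, hpv]
    simp; omega
  | case2 j h =>
    rcases Decidable.not_and_iff_or_not.mp h with hj | hne
    · have : (cs1.zip cs2).length ≤ j := by omega
      rw [List.drop_eq_nil_of_le this]
      simp
    · have hne' : PySem.List.pyGet? cs1 (j : Int) = PySem.List.pyGet? cs2 (j : Int) :=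
        not_not.mp hne
      by_cases hj : j < n
      · have hj1 : j < cs1.length := by simp [hn, List.length_zip] at hj; omega
        have hj2 : j < cs2.length := by simp [hn, List.length_zip] at hj; omega
        have hzj : j < (cs1.zip cs2).length := by omega
        have hceq : cs1[j] = cs2[j] := by
          simpa [PySem.List.pyGet?_natCast, List.getElem?_eq_getElem, hj1, hj2] using hne'
        have hpv : pvNe ((cs1.zip cs2)[j]) = false := by
          simp [pvNe, List.getElem_zip, hceq]
        rw [List.drop_eq_getElem_cons hzj, List.takeWhile_cons, hpv]
        simp
      · have : (cs1.zip cs2).length ≤ j := by omega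
        rw [List.drop_eq_nil_of_le this]
        simp

theorem pvGoA_spec (cs1 cs2 : List Char) (n i : Nat) (acc : List (String × String))
    (hn : n = (cs1.zip cs2).length) :
    pvGoA cs1 cs2 n i acc = acc ++ pvF ((cs1.zip cs2).drop i) := by
  have hbase : ∀ i acc, ¬ i < n → pvGoA cs1 cs2 n i acc = acc ++ pvF ((cs1.zip cs2).drop i) := by
    intro i acc hi
    rw [pvGoA, dif_neg hi, List.drop_eq_nil_of_le (by omega)]
    simp [pvF]
  have H : ∀ m i acc, n - i ≤ m → pvGoA cs1 cs2 n i acc = acc ++ pvF ((cs1.zip cs2).drop i) := by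
    intro m
    induction m with
    | zero =>
      intro i acc hm
      exact hbase i acc (by omega)
    | succ m ih =>
      intro i acc hm
      by_cases hi : i < n
      · have hi1 : i < cs1.length := by simp [hn, List.length_zip] at hi; omega
        have hi2 : i < cs2.length := by simp [hn, List.length_zip] at hi; omega
        have hzi : i < (cs1.zip cs2).length := by omega
        by_cases heq : PySem.List.pyGet? cs1 (i : Int) = PySem.List.pyGet? cs2 (i : Int)
        · rw [pvGoA, dif_pos hi, dif_pos heq, ih (i + 1) acc (by omega)]
          have hceq : cs1[i] = cs2[i] := by
            simpa [PySem.List.pyGet?_natCast, List.getElem?_eq_getElem, hi1, hi2] using heq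
          rw [List.drop_eq_getElem_cons hzi, List.getElem_zip]
          simp [pvF, hceq]
        · -- mismatch: the run starts at i
          have hjk := pvExtA_spec cs1 cs2 n i hn
          set tw := ((cs1.zip cs2).drop i).takeWhile pvNe with htwdef
          set k := tw.length with hkdef
          -- k ≥ 1: the head of drop i is a mismatching pair
          have hcne : cs1[i] ≠ cs2[i] := by
            intro hc
            exact heq (by simp [PySem.List.pyGet?_natCast, List.getElem?_eq_getElem, hi1, hi2, hc])
          have hhead : (cs1.zip cs2).drop i = (cs1[i], cs2[i]) :: (cs1.zip cs2).drop (i + 1) := by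
            rw [List.drop_eq_getElem_cons hzi, List.getElem_zip]
          have hk1 : 1 ≤ k := by
            rw [hkdef, htwdef, hhead, List.takeWhile_cons, show pvNe (cs1[i], cs2[i]) = true from by simp [pvNe, hcne]]
            simp
          have hkb : k ≤ (cs1.zip cs2).length - i := by
            have := (List.takeWhile_prefix (p := pvNe) (l := (cs1.zip cs2).drop i)).length_le
            rw [← htwdef] at this
            simp only [List.length_drop] at this
            omega
          have hzlen : (cs1.zip cs2).length = min cs1.length cs2.length := List.length_zip ..
          -- takeWhile / dropWhile as take / drop
          have htw : tw = ((cs1.zip cs2).drop i).take k := by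
            conv_rhs => rw [← List.takeWhile_append_dropWhile (p := pvNe) (l := (cs1.zip cs2).drop i)]
            rw [← htwdef, List.take_left' rfl]
          have hdw : ((cs1.zip cs2).drop i).dropWhile pvNe = (cs1.zip cs2).drop (i + k) := by
            have h1 : tw ++ ((cs1.zip cs2).drop i).dropWhile pvNe = (cs1.zip cs2).drop i := by
              rw [htwdef]; exact List.takeWhile_append_dropWhile
            have h2 := congrArg (List.drop k) h1
            rw [List.drop_left' hkdef.symm] at h2
            rw [h2, List.drop_drop]
          have hzip_drop : (cs1.zip cs2).drop i = (cs1.drop i).zip (cs2.drop i) := by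
            simp [List.zip, List.drop_zipWith]
          have hzip_take : ((cs1.drop i).zip (cs2.drop i)).take k
              = ((cs1.drop i).take k).zip ((cs2.drop i).take k) := by
            simp [List.zip, List.take_zipWith]
          have hlen1 : ((cs1.drop i).take k).length = k := by
            simp [List.length_take, List.length_drop]; omega
          have hlen2 : ((cs2.drop i).take k).length = k := by
            simp [List.length_take, List.length_drop]; omega
          have hmap1 : tw.map Prod.fst = (cs1.drop i).take k := by
            rw [htw, hzip_drop, hzip_take]
            exact List.map_fst_zip (le_of_eq (hlen1.trans hlen2.symm))
          have hmap2 : tw.map Prod.snd = (cs2.drop i).take k := by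
            rw [htw, hzip_drop, hzip_take]
            exact List.map_snd_zip (le_of_eq (hlen2.trans hlen1.symm))
          have hslice1 : PySem.List.slice cs1 (some (i : Int)) (some ((i + k : Nat) : Int))
              = (cs1.drop i).take k := by
            rw [PySem.List.slice_natCast, show i + k - i = k from by omega]
          have hslice2 : PySem.List.slice cs2 (some (i : Int)) (some ((i + k : Nat) : Int))
              = (cs2.drop i).take k := by
            rw [PySem.List.slice_natCast, show i + k - i = k from by omega]
          rw [pvGoA, dif_pos hi, dif_neg heq]
          simp only [hjk, hslice1, hslice2]
          rw [ih (i + k) _ (by omega)]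
          conv_rhs => rw [pvF_run ((cs1.zip cs2).drop i)]
          rw [← htwdef, hdw, hmap1, hmap2]
          simp only [pvEmit]
          split <;> simp
      · exact hbase i acc hi
  exact H (n - i) i acc le_rfl

-- ===== VERDICT (by name: the statement is the Claim_ definition above) =====
theorem mine_confusion_pairs_spec : Claim_equal_mine_confusion_pairs := by
  intro s1 s2 _
  show _ = _
  rw [mine_confusion_pairs, mine_confusion_pairs_alt]
  have hn : min s1.toList.length s2.toList.length = (s1.toList.zip s2.toList).length := by
    simp [List.length_zip]
  rw [pvGoA_spec _ _ _ _ _ hn, List.drop_zero, List.nil_append]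
  have := pvFoldB (s1.toList.zip s2.toList) [] [] [] rfl
  simp only [List.nil_append] at this
  rw [this, pvH_eq_pvF, List.nil_append, List.nil_append, ← pvF_run]
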